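-- pv_equiv track=rewrite | github.com/bambamshivam/AtCoder | Grand_Contest_54/A.py | mo
-- ===== SOURCE A (Python) =====
-- def mo(s):
-- 	if len(s)==0:
-- 		return (True,0)
-- 	if s==s[0]*len(s):
-- 		return (False,-1)
-- 	m=1000000000000000
-- 	f=0
-- 	for i in range(1,len(s)):
-- 		if s[i]!=s[0]:
-- 			x=mo(s[i+1:])
-- 			if x[0]==True:
-- 				m=min(m,x[1]+1)
-- 				f=1
--
--
-- 	if f==1:
-- 		return (True,m)
-- 	else:
-- 		return (False,-1)
-- ===== SOURCE B (Python) =====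
-- INF = 1000000000000000  # same "no candidate" sentinel as the original, kept for exactness
--
-- def mo(s):
--     # bottom-up DP over suffix start positions: dp[0] is the answer for s[j:],
--     # built from the right, so each suffix is solved once.
--     dp = [(True, 0)]
--     for j in range(len(s) - 1, -1, -1):
--         c = s[j]
--         rest = s[j + 1:]
--         if all(ch == c for ch in rest):
--             dp.insert(0, (False, -1))
--             continue
--         best = INF
--         ok = False
--         for ch, prev in zip(rest, dp[1:]):
--             if ch != c and prev[0]:
--                 best = min(best, prev[1] + 1)
--                 ok = True
--         dp.insert(0, (True, best) if ok else (False, -1))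
--     return dp[0]
-- ===== Notes on version B (the rewrite author's own statement) =====
-- stated objective: faster
-- what changed: Replaced the exponential naive recursion over suffixes by a bottom-up dynamic programming pass that solves each suffix exactly once (dp array indexed by suffix start); intended as faster (asymptotic): a timing run read 4.93x at the largest size both finished (n=16) and A timed out at n=64 where B returned.
import Mathlib
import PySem

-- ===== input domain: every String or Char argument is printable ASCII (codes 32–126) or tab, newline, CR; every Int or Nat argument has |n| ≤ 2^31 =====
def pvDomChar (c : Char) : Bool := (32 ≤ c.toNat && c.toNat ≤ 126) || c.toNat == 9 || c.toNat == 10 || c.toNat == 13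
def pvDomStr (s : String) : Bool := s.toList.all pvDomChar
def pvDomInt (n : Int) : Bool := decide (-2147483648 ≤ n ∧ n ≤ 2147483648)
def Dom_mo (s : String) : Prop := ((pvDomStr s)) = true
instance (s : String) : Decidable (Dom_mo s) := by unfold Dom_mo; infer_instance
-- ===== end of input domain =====

-- B replaces A's exponential recursion over suffixes by a bottom-up DP solving each suffix once; intended as faster (measured 4.93x at n=16, A timed out at n=64 where B returned).

-- ===== PORT A =====
-- Literal port of A: naive recursion; the for-loop over i=1..len-1 walks the tail t,
-- the element at position i is the head of the remaining list and s[i+1:] is its tail.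
mutual
def moL : List Char → Bool × Int
  | [] => (true, 0)
  | c :: t =>
    if c :: t = List.replicate (t.length + 1) c then (false, -1)
    else
      let st := moGo c t (1000000000000000, false)
      if st.2 then (true, st.1) else (false, -1)
termination_by s => (s.length, 0)

def moGo (c : Char) : List Char → Int × Bool → Int × Bool
  | [], st => st
  | d :: rest, st =>
    let st' :=
      if d ≠ c then
        let x := moL rest
        if x.1 = true then (min st.1 (x.2 + 1), true) else st
      else st
    moGo c rest st'
termination_by l st => (l.length, 1)
end

def mo (s : String) : Bool × Int := moL s.toList

-- ===== PORT B =====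
-- Port of Source B: dp built back-to-front; dp head is the answer for the current suffix.
def moCell (c : Char) (rest : List Char) (dp : List (Bool × Int)) : Bool × Int :=
  if rest.all (fun d => d == c) then (false, -1)
  else
    let st := (rest.zip (dp.drop 1)).foldl
      (fun (st : Int × Bool) p =>
        if p.1 ≠ c ∧ p.2.1 = true then (min st.1 (p.2.2 + 1), true) else st)
      (1000000000000000, false)
    if st.2 then (true, st.1) else (false, -1)

def moDp : List Char → List (Bool × Int)
  | [] => [(true, 0)]
  | c :: t => moCell c t (moDp t) :: moDp t

def mo_alt (s : String) : Bool × Int := (moDp s.toList).headI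

-- ===== PRECONDITION & SPEC =====
def Spec_mo (s : String) (out : Bool × Int) : Prop := out = mo_alt s
instance (s : String) (out : Bool × Int) : Decidable (Spec_mo s out) := by unfold Spec_mo; infer_instance

-- ===== CLAIM (what is proved, stated in full; the proofs are below) =====
def Claim_equal_mo : Prop := ∀ (s : String), Dom_mo s → Spec_mo s (mo s)

-- ===== LEMMAS AND PROOFS =====

-- A's all-equal string test agrees with B's all-equal test on the tail.
theorem replicate_iff_all (c : Char) (t : List Char) :
    (c :: t = List.replicate (t.length + 1) c) ↔ (t.all (fun d => d == c) = true) := by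
  simp [List.replicate_succ, List.eq_replicate_iff]

-- the head of l.tails is l itself.
theorem tails_step (l : List Char) : l.tails = l :: l.tails.tail := by
  cases l <;> simp

-- A's inner loop equals B's fold over the tail zipped with the dp of the later suffixes.
theorem moGo_eq (c : Char) (t : List Char) (st : Int × Bool) :
    moGo c t st = (t.zip ((t.tails.map moL).drop 1)).foldl
      (fun (st : Int × Bool) p =>
        if p.1 ≠ c ∧ p.2.1 = true then (min st.1 (p.2.2 + 1), true) else st)
      st := by
  induction t generalizing st with
  | nil => simp [moGo]
  | cons d rest ih =>
    rw [moGo, ih, List.tails_cons, tails_step rest]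
    simp only [List.map_cons, List.drop_succ_cons, List.drop_zero, List.zip_cons_cons,
      List.foldl_cons]
    congr 1
    by_cases h : d = c
    · simp [h]
    · by_cases hx : (moL rest).1 = true <;> simp [h, hx]

-- The dp list is exactly moL applied to every suffix.
theorem moDp_eq (t : List Char) : moDp t = t.tails.map moL := by
  induction t with
  | nil => simp [moDp, moL]
  | cons c rest ih =>
    simp only [moDp, ih, List.tails, List.map]
    congr 1
    rw [moCell, moL]
    by_cases h : c :: rest = List.replicate (rest.length + 1) c
    · rw [if_pos h, if_pos ((replicate_iff_all c rest).mp h)]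
    · rw [if_neg h, if_neg (fun hb => h ((replicate_iff_all c rest).mpr hb))]
      rw [moGo_eq]

theorem headI_moDp (t : List Char) : (moDp t).headI = moL t := by
  rw [moDp_eq]; cases t <;> simp [List.tails]

-- ===== VERDICT (by name: the statement is the Claim_ definition above) =====
theorem mo_spec : Claim_equal_mo := by
  intro s _
  unfold Spec_mo mo mo_alt
  rw [headI_moDp]
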